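-- pv_equiv track=rewrite | github.com/adobe-type-tools/psautohint | python/psautohint/otfFont.py | checkStem3ArgsOverlap
-- ===== SOURCE A (Python) =====
-- kHintArgsNoOverlap = 0
--
-- kHintArgsOverLap = 1
--
-- kHintArgsMatch = 2
--
-- def checkStem3ArgsOverlap(arg_list, hint_list):
--     status = kHintArgsNoOverlap
--     for x0, x1 in arg_list:
--         x1 = x0 + x1
--         for y0, y1 in hint_list:
--             y1 = y0 + y1
--             if x0 == y0:
--                 if x1 == y1:
--                     status = kHintArgsMatch
--                 else:
--                     return kHintArgsOverLap
--             elif x1 == y1: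
--                 return kHintArgsOverLap
--             else:
--                 if (x0 > y0) and (x0 < y1):
--                     return kHintArgsOverLap
--                 if (x1 > y0) and (x1 < y1):
--                     return kHintArgsOverLap
--     return status
-- ===== SOURCE B (Python) =====
-- kHintArgsNoOverlap = 0
--
-- kHintArgsOverLap = 1
--
-- kHintArgsMatch = 2
--
--
-- def checkStem3ArgsOverlap(arg_list, hint_list):
--     # Index the hints once, then answer each arg by lookups:
--     # an overlap exists iff some arg shares a start (with a different end),
--     # shares an end (with a different start), or has an endpoint strictly
--     # inside some hint interval; a match iff the arg's interval is a hint.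
--     hints = [(y0, y0 + v) for y0, v in hint_list]
--     ends_at = {}    # start -> (min end, max end) over hints with that start
--     starts_at = {}  # end -> (min start, max start) over hints with that end
--     for y0, y1 in hints:
--         lo, hi = ends_at.get(y0, (y1, y1))
--         ends_at[y0] = (min(lo, y1), max(hi, y1))
--         lo, hi = starts_at.get(y1, (y0, y0))
--         starts_at[y1] = (min(lo, y0), max(hi, y0))
--     # hints sorted by start (stable), with running maximum of ends, for the
--     # "strictly inside some hint" queries via binary search
--     seq = sorted(hints, key=lambda h: h[0])
--     starts = [y0 for y0, _ in seq]
--     pref = []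
--     m = None
--     for _, y1 in seq:
--         m = y1 if m is None else max(m, y1)
--         pref.append(m)
--
--     def inside(p):
--         # p strictly inside some hint <=> among hints with start < p,
--         # the maximal end exceeds p; count starts < p by binary search
--         lo, hi = 0, len(starts)
--         while lo < hi:
--             mid = (lo + hi) // 2
--             if starts[mid] < p:
--                 lo = mid + 1
--             else:
--                 hi = mid
--         return lo > 0 and pref[lo - 1] > p
--
--     def overlaps(x0, x1):
--         if x0 in ends_at and ends_at[x0] != (x1, x1):
--             return True
--         if x1 in starts_at and starts_at[x1] != (x0, x0):
--             return True
--         return inside(x0) or inside(x1)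
--
--     if any(overlaps(x0, x0 + w) for x0, w in arg_list):
--         return kHintArgsOverLap
--     hintset = set(hints)
--     if any((x0, x0 + w) in hintset for x0, w in arg_list):
--         return kHintArgsMatch
--     return kHintArgsNoOverlap
-- ===== Notes on version B (the rewrite author's own statement) =====
-- stated objective: alternative
-- what changed: Replaces A's nested all-pairs scan by indexing the hints once (start->min/max-end and end->min/max-start dicts, plus the hints sorted by start with a running-max-of-ends prefix queried by hand-written binary search), so each arg is answered by dict lookups and O(log m) search instead of an inner scan over all hints.
import Mathlib
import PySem

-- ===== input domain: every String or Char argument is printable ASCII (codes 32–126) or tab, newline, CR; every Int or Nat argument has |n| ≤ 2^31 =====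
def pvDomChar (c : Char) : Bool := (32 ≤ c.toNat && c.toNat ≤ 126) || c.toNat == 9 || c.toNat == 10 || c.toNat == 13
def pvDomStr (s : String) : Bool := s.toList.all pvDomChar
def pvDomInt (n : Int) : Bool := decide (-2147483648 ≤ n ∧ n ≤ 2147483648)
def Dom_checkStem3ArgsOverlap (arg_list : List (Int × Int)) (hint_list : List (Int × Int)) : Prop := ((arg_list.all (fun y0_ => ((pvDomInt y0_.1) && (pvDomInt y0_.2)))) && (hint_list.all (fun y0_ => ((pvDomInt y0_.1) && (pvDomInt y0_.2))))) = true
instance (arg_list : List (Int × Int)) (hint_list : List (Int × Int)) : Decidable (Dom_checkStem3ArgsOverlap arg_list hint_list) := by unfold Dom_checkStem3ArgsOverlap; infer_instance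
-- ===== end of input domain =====

-- B indexes the hints once (dicts keyed by start/end plus a sorted-by-start list with a
-- running max of ends, queried by binary search) instead of A's nested all-pairs scan.

-- ===== PORT A =====
-- inner loop over hint_list: .inl r = early `return r`, .inr s = fall through with status s
def pvInnerA (x0 x1 : Int) : List (Int × Int) → Int → Sum Int Int
  | [], status => .inr status
  | (y0, yw) :: rest, status =>
    let y1 := y0 + yw
    if x0 = y0 then
      if x1 = y1 then pvInnerA x0 x1 rest 2
      else .inl 1
    else if x1 = y1 then .inl 1
    else if x0 > y0 ∧ x0 < y1 then .inl 1
    else if x1 > y0 ∧ x1 < y1 then .inl 1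
    else pvInnerA x0 x1 rest status

def pvOuterA (hint_list : List (Int × Int)) : List (Int × Int) → Int → Int
  | [], status => status
  | (x0, xw) :: rest, status =>
    match pvInnerA x0 (x0 + xw) hint_list status with
    | .inl r => r
    | .inr s => pvOuterA hint_list rest s

def checkStem3ArgsOverlap (arg_list : List (Int × Int)) (hint_list : List (Int × Int)) : Int :=
  pvOuterA hint_list arg_list 0

-- ===== PORT B =====
-- the indexing loop: ends_at (start -> (min end, max end)) and starts_at (end -> (min start, max start))
def pvIdxStep (ds : PySem.Dict Int (Int × Int) × PySem.Dict Int (Int × Int)) (h : Int × Int) :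
    PySem.Dict Int (Int × Int) × PySem.Dict Int (Int × Int) :=
  let p := ds.1.getD h.1 (h.2, h.2)
  let q := ds.2.getD h.2 (h.1, h.1)
  (ds.1.insert h.1 (min p.1 h.2, max p.2 h.2), ds.2.insert h.2 (min q.1 h.1, max q.2 h.1))

def pvIndexHints (hints : List (Int × Int)) :
    PySem.Dict Int (Int × Int) × PySem.Dict Int (Int × Int) :=
  hints.foldl pvIdxStep (PySem.Dict.empty, PySem.Dict.empty)

-- the `pref` loop: running maximum of the ends (m is Python's None-initialised m)
def pvBuildPref : List (Int × Int) → Option Int → List Int → List Int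
  | [], _, acc => acc
  | h :: rest, m, acc =>
      let m' := match m with | none => h.2 | some v => max v h.2
      pvBuildPref rest (some m') (acc ++ [m'])

-- Source B's hand-written binary search (`while lo < hi` loop); starts[mid] is always in
-- range when read (lo ≤ mid < hi ≤ len), so the getD default is never used
def pvLowerBound (starts : List Int) (p : Int) (lo hi : Nat) : Nat :=
  if _h : lo < hi then
    let mid := (lo + hi) / 2
    if starts.getD mid 0 < p then pvLowerBound starts p (mid + 1) hi
    else pvLowerBound starts p lo mid
  else lo
termination_by hi - lo
decreasing_by all_goals omega

def pvInside (starts pref : List Int) (p : Int) : Bool :=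
  let lo := pvLowerBound starts p 0 starts.length
  decide (0 < lo) && decide (p < pref.getD (lo - 1) 0)

-- `x0 in d and d[x0] != t` is: some value v at x0 and v ≠ t
def pvOverlaps (ends_at starts_at : PySem.Dict Int (Int × Int)) (starts pref : List Int)
    (x0 x1 : Int) : Bool :=
  (match ends_at.get? x0 with | some v => decide (v ≠ (x1, x1)) | none => false) ||
  (match starts_at.get? x1 with | some v => decide (v ≠ (x0, x0)) | none => false) ||
  pvInside starts pref x0 || pvInside starts pref x1

def checkStem3ArgsOverlap_alt (arg_list : List (Int × Int)) (hint_list : List (Int × Int)) : Int :=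
  let hints := hint_list.map (fun h => (h.1, h.1 + h.2))
  let ds := pvIndexHints hints
  let seq := PySem.List.sorted hints (fun h => h.1) false
  let starts := seq.map (fun h => h.1)
  let pref := pvBuildPref seq none []
  if arg_list.any (fun a => pvOverlaps ds.1 ds.2 starts pref a.1 (a.1 + a.2)) then 1
  else if arg_list.any (fun a => PySem.Set.contains (PySem.Set.ofList hints) (a.1, a.1 + a.2)) then 2
  else 0

-- ===== PRECONDITION & SPEC =====
def Spec_checkStem3ArgsOverlap (arg_list : List (Int × Int)) (hint_list : List (Int × Int)) (out : Int) : Prop := out = checkStem3ArgsOverlap_alt arg_list hint_list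
instance (arg_list : List (Int × Int)) (hint_list : List (Int × Int)) (out : Int) : Decidable (Spec_checkStem3ArgsOverlap arg_list hint_list out) := by unfold Spec_checkStem3ArgsOverlap; infer_instance

-- ===== CLAIM (what is proved, stated in full; the proofs are below) =====
def Claim_equal_checkStem3ArgsOverlap : Prop := ∀ (arg_list : List (Int × Int)) (hint_list : List (Int × Int)), Dom_checkStem3ArgsOverlap arg_list hint_list → Spec_checkStem3ArgsOverlap arg_list hint_list (checkStem3ArgsOverlap arg_list hint_list)

-- ===== LEMMAS AND PROOFS =====

-- the per-pair "overlap" and "match" conditions both programs decide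
def pvOv (x0 x1 : Int) (h : Int × Int) : Bool :=
  decide ((x0 = h.1 ∧ x1 ≠ h.2) ∨ (x1 = h.2 ∧ x0 ≠ h.1) ∨ (h.1 < x0 ∧ x0 < h.2) ∨ (h.1 < x1 ∧ x1 < h.2))
def pvMt (x0 x1 : Int) (h : Int × Int) : Bool := decide ((x0, x1) = h)

-- A's inner loop returns `.inl 1` iff some hint overlaps; else upgrades status on a match
lemma pvInnerA_eq (x0 x1 : Int) (hl : List (Int × Int)) (status : Int) :
    pvInnerA x0 x1 hl status =
      if hl.any (fun h => pvOv x0 x1 (h.1, h.1 + h.2)) then .inl 1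
      else .inr (if hl.any (fun h => pvMt x0 x1 (h.1, h.1 + h.2)) then 2 else status) := by
  induction hl generalizing status with
  | nil => simp [pvInnerA]
  | cons h rest ih =>
    obtain ⟨y0, yw⟩ := h
    simp only [List.any_cons, pvInnerA]
    by_cases h00 : x0 = y0
    · by_cases h11 : x1 = y0 + yw
      · have ho : pvOv x0 x1 (y0, y0 + yw) = false := by simp [pvOv]; omega
        have hm : pvMt x0 x1 (y0, y0 + yw) = true := by
          simp [pvMt, Prod.ext_iff]; omega
        rw [if_pos h00, if_pos h11, ih]
        by_cases hb : (rest.any fun h => pvOv x0 x1 (h.1, h.1 + h.2)) = true <;>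
          simp [hb, ho, hm]
      · have ho : pvOv x0 x1 (y0, y0 + yw) = true := by simp [pvOv]; omega
        rw [if_pos h00, if_neg h11]
        simp [ho]
    · by_cases h11 : x1 = y0 + yw
      · have ho : pvOv x0 x1 (y0, y0 + yw) = true := by simp [pvOv]; omega
        rw [if_neg h00, if_pos h11]
        simp [ho]
      · by_cases hin0 : x0 > y0 ∧ x0 < y0 + yw
        · have ho : pvOv x0 x1 (y0, y0 + yw) = true := by simp [pvOv]; omega
          rw [if_neg h00, if_neg h11, if_pos hin0]
          simp [ho]
        · by_cases hin1 : x1 > y0 ∧ x1 < y0 + yw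
          · have ho : pvOv x0 x1 (y0, y0 + yw) = true := by simp [pvOv]; omega
            rw [if_neg h00, if_neg h11, if_neg hin0, if_pos hin1]
            simp [ho]
          · have ho : pvOv x0 x1 (y0, y0 + yw) = false := by simp [pvOv]; omega
            have hm : pvMt x0 x1 (y0, y0 + yw) = false := by
              simp [pvMt, Prod.ext_iff]; omega
            rw [if_neg h00, if_neg h11, if_neg hin0, if_neg hin1, ih]
            simp only [ho, hm, Bool.false_or]

lemma pvOuterA_eq (hl args : List (Int × Int)) (status : Int) :
    pvOuterA hl args status =
      if args.any (fun a => hl.any (fun h => pvOv a.1 (a.1 + a.2) (h.1, h.1 + h.2))) then 1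
      else if args.any (fun a => hl.any (fun h => pvMt a.1 (a.1 + a.2) (h.1, h.1 + h.2))) then 2
      else status := by
  induction args generalizing status with
  | nil => simp [pvOuterA]
  | cons a rest ih =>
    obtain ⟨x0, xw⟩ := a
    simp only [pvOuterA, pvInnerA_eq, List.any_cons]
    by_cases hb1 : (hl.any fun h => pvOv x0 (x0 + xw) (h.1, h.1 + h.2)) = true
    · simp only [hb1, Bool.true_or]
      simp
    · rw [Bool.not_eq_true] at hb1
      by_cases hb2 : (hl.any fun h => pvMt x0 (x0 + xw) (h.1, h.1 + h.2)) = true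
      · simp only [hb1, hb2, Bool.false_or, Bool.true_or]
        simp [ih]
      · rw [Bool.not_eq_true] at hb2
        simp only [hb1, hb2, Bool.false_or]
        simp [ih]


-- ---- B-side characterisations ----

-- running min/max of a list of values, as the dicts maintain it per key
def mmStep (acc : Option (Int × Int)) (y : Int) : Option (Int × Int) :=
  match acc with
  | none => some (y, y)
  | some p => some (min p.1 y, max p.2 y)

lemma pvIdx_fst_get? (l : List (Int × Int)) :
    ∀ (e s : PySem.Dict Int (Int × Int)) (k : Int),
      ((l.foldl pvIdxStep (e, s)).1).get? k
        = ((l.filter (fun h => h.1 == k)).map (fun h => h.2)).foldl mmStep (e.get? k) := by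
  induction l with
  | nil => intro e s k; rfl
  | cons h t ih =>
    intro e s k
    obtain ⟨a, b⟩ := h
    rw [List.foldl_cons, List.filter_cons]
    have hunfold : pvIdxStep (e, s) (a, b)
        = (e.insert a (min (e.getD a (b, b)).1 b, max (e.getD a (b, b)).2 b),
           s.insert b (min (s.getD b (a, a)).1 a, max (s.getD b (a, a)).2 a)) := rfl
    by_cases hk : a = k
    · subst hk
      simp only [beq_self_eq_true, if_pos, List.map_cons, List.foldl_cons]
      rw [hunfold, ih]
      congr 1
      rw [PySem.Dict.get?_insert, if_pos rfl, PySem.Dict.getD_eq_get?_getD]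
      cases e.get? a with
      | none => simp [mmStep]
      | some p => simp [mmStep]
    · have hbeq : ((a : Int) == k) = false := by simp [hk]
      rw [hbeq, if_neg (by simp)]
      rw [hunfold, ih]
      congr 1
      rw [PySem.Dict.get?_insert, if_neg (fun hh => hk hh.symm)]

lemma pvIdx_snd_get? (l : List (Int × Int)) :
    ∀ (e s : PySem.Dict Int (Int × Int)) (k : Int),
      ((l.foldl pvIdxStep (e, s)).2).get? k
        = ((l.filter (fun h => h.2 == k)).map (fun h => h.1)).foldl mmStep (s.get? k) := by
  induction l with
  | nil => intro e s k; rfl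
  | cons h t ih =>
    intro e s k
    obtain ⟨a, b⟩ := h
    rw [List.foldl_cons, List.filter_cons]
    have hunfold : pvIdxStep (e, s) (a, b)
        = (e.insert a (min (e.getD a (b, b)).1 b, max (e.getD a (b, b)).2 b),
           s.insert b (min (s.getD b (a, a)).1 a, max (s.getD b (a, a)).2 a)) := rfl
    by_cases hk : b = k
    · subst hk
      simp only [beq_self_eq_true, if_pos, List.map_cons, List.foldl_cons]
      rw [hunfold, ih]
      congr 1
      rw [PySem.Dict.get?_insert, if_pos rfl, PySem.Dict.getD_eq_get?_getD]
      cases s.get? b with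
      | none => simp [mmStep]
      | some p => simp [mmStep]
    · have hbeq : ((b : Int) == k) = false := by simp [hk]
      rw [hbeq, if_neg (by simp)]
      rw [hunfold, ih]
      congr 1
      rw [PySem.Dict.get?_insert, if_neg (fun hh => hk hh.symm)]

lemma mmStep_foldl_some (ys : List Int) :
    ∀ a b : Int, ys.foldl mmStep (some (a, b)) = some (ys.foldl min a, ys.foldl max b) := by
  induction ys with
  | nil => intro a b; rfl
  | cons y t ih => intro a b; simp only [List.foldl_cons, mmStep]; exact ih _ _

lemma mm_ne_char (ys : List Int) (t : Int) :
    (match ys.foldl mmStep none with | some v => decide (v ≠ (t, t)) | none => false)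
      = ys.any (fun y => y ≠ t) := by
  cases ys with
  | nil => rfl
  | cons y l =>
    have h1 : (y :: l).foldl mmStep none = some (l.foldl min y, l.foldl max y) := by
      simp only [List.foldl_cons, mmStep]; exact mmStep_foldl_some l y y
    rw [h1]
    rw [Bool.eq_iff_iff]
    simp only [decide_eq_true_eq, List.any_cons, Bool.or_eq_true, List.any_eq_true,
      decide_eq_true_eq, ne_eq, Prod.mk.injEq, not_and]
    constructor
    · intro hne
      by_contra hc
      push Not at hc
      obtain ⟨hy, hl⟩ := hc
      have hmin : l.foldl min y = t := by
        rcases PySem.List.foldl_min_mem l y with h | h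
        · omega
        · exact hl _ h
      have hmax : l.foldl max y = t := by
        rcases PySem.List.foldl_max_mem l y with h | h
        · omega
        · exact hl _ h
      exact hne hmin hmax
    · rintro (hy | ⟨z, hz, hzt⟩) hmin hmax
      · have h2 := (PySem.List.foldl_min_le l y).1
        have h3 := (PySem.List.le_foldl_max l y).1
        omega
      · have h2 := (PySem.List.foldl_min_le l y).2 z hz
        have h3 := (PySem.List.le_foldl_max l y).2 z hz
        omega

lemma shareStart_char (hints : List (Int × Int)) (k t : Int) :
    (match (pvIndexHints hints).1.get? k with | some v => decide (v ≠ (t, t)) | none => false)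
      = hints.any (fun h => h.1 = k ∧ h.2 ≠ t) := by
  unfold pvIndexHints
  rw [pvIdx_fst_get? hints PySem.Dict.empty PySem.Dict.empty k, PySem.Dict.get?_empty,
    mm_ne_char, List.any_map, List.any_filter]
  rw [Bool.eq_iff_iff]
  simp only [List.any_eq_true, Function.comp, Bool.and_eq_true, beq_iff_eq,
    decide_eq_true_eq, ne_eq]

lemma shareEnd_char (hints : List (Int × Int)) (k t : Int) :
    (match (pvIndexHints hints).2.get? k with | some v => decide (v ≠ (t, t)) | none => false)
      = hints.any (fun h => h.2 = k ∧ h.1 ≠ t) := by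
  unfold pvIndexHints
  rw [pvIdx_snd_get? hints PySem.Dict.empty PySem.Dict.empty k, PySem.Dict.get?_empty,
    mm_ne_char, List.any_map, List.any_filter]
  rw [Bool.eq_iff_iff]
  simp only [List.any_eq_true, Function.comp, Bool.and_eq_true, beq_iff_eq,
    decide_eq_true_eq, ne_eq]

-- ---- pref / binary search ----

def mfold (m : Option Int) (ys : List Int) : Option Int :=
  ys.foldl (fun a y => some (match a with | none => y | some v => max v y)) m

lemma buildPref_acc (l : List (Int × Int)) :
    ∀ (m : Option Int) (acc : List Int), pvBuildPref l m acc = acc ++ pvBuildPref l m [] := by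
  induction l with
  | nil => intro m acc; simp [pvBuildPref]
  | cons h t ih =>
    intro m acc
    simp only [pvBuildPref]
    rw [ih _ (acc ++ _), ih _ ([] ++ _)]
    simp

lemma mfold_some (ys : List Int) : ∀ a : Int, mfold (some a) ys = some (ys.foldl max a) := by
  induction ys with
  | nil => intro a; rfl
  | cons y t ih => intro a; simp only [mfold, List.foldl_cons]; exact ih (max a y)

lemma buildPref_getD (l : List (Int × Int)) :
    ∀ (m : Option Int) (i : Nat), i < l.length →
      some ((pvBuildPref l m []).getD i 0) = mfold m ((l.take (i + 1)).map (fun h => h.2)) := by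
  induction l with
  | nil => intro m i hi; simp at hi
  | cons h t ih =>
    intro m i hi
    simp only [pvBuildPref]
    rw [buildPref_acc]
    cases i with
    | zero =>
      simp only [List.take_succ_cons, List.take_zero, List.map_cons, List.map_nil]
      cases m <;> rfl
    | succ i =>
      simp only [List.nil_append, List.take_succ_cons, List.map_cons, List.singleton_append,
        List.getD, List.getElem?_cons_succ]
      cases m with
      | none =>
        have := ih (some h.2) i (by simpa using hi)
        simpa [List.getD] using this
      | some v =>
        have := ih (some (max v h.2)) i (by simpa using hi)
        simpa [List.getD] using this

lemma pvLowerBound_spec (starts : List Int) (p : Int)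
    (hs : starts.Pairwise (· ≤ ·)) :
    ∀ (n lo hi : Nat), hi - lo = n → lo ≤ hi → hi ≤ starts.length →
      (∀ (j : Nat) (hj : j < starts.length), j < lo → starts[j] < p) →
      (∀ (j : Nat) (hj : j < starts.length), hi ≤ j → p ≤ starts[j]) →
      lo ≤ pvLowerBound starts p lo hi ∧ pvLowerBound starts p lo hi ≤ hi ∧
      (∀ (j : Nat) (hj : j < starts.length), j < pvLowerBound starts p lo hi → starts[j] < p) ∧
      (∀ (j : Nat) (hj : j < starts.length), pvLowerBound starts p lo hi ≤ j → p ≤ starts[j]) := by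
  have hmono := List.pairwise_iff_getElem.mp hs
  intro n
  induction n using Nat.strong_induction_on with
  | _ n ihn =>
    intro lo hi hn hle hlen hlow hhigh
    by_cases hlt : lo < hi
    · have hmid1 : lo ≤ (lo + hi) / 2 := by omega
      have hmid2 : (lo + hi) / 2 < hi := by omega
      have hmidlen : (lo + hi) / 2 < starts.length := by omega
      have hstep : pvLowerBound starts p lo hi
          = if starts.getD ((lo + hi) / 2) 0 < p then pvLowerBound starts p ((lo + hi) / 2 + 1) hi
            else pvLowerBound starts p lo ((lo + hi) / 2) := by
        rw [pvLowerBound, dif_pos hlt]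
      rw [hstep, List.getD_eq_getElem starts 0 hmidlen]
      by_cases hcmp : starts[(lo + hi) / 2] < p
      · rw [if_pos hcmp]
        have hrec := ihn (hi - ((lo + hi) / 2 + 1)) (by omega) ((lo + hi) / 2 + 1) hi rfl
          (by omega) hlen
          (fun j hj hjlt => by
            rcases Nat.lt_or_ge j ((lo + hi) / 2) with h | h
            · exact lt_of_le_of_lt (hmono j ((lo + hi) / 2) hj hmidlen h) hcmp
            · have : j = (lo + hi) / 2 := by omega
              subst this; exact hcmp)
          hhigh
        exact ⟨by omega, hrec.2.1, hrec.2.2.1, hrec.2.2.2⟩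
      · rw [if_neg hcmp]
        have hple : p ≤ starts[(lo + hi) / 2] := by omega
        have hrec := ihn ((lo + hi) / 2 - lo) (by omega) lo ((lo + hi) / 2) rfl
          (by omega) (by omega) hlow
          (fun j hj hjge => by
            rcases Nat.lt_or_ge ((lo + hi) / 2) j with h | h
            · exact le_trans hple (hmono ((lo + hi) / 2) j hmidlen hj h)
            · have : j = (lo + hi) / 2 := by omega
              subst this; exact hple)
        exact ⟨hrec.1, by omega, hrec.2.2.1, hrec.2.2.2⟩
    · have hstep : pvLowerBound starts p lo hi = lo := by
        rw [pvLowerBound, dif_neg hlt]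
      rw [hstep]
      have : lo = hi := by omega
      subst this
      exact ⟨le_rfl, le_rfl, fun j hj hjl => hlow j hj hjl, fun j hj hjl => hhigh j hj hjl⟩

lemma pvInside_char (seq : List (Int × Int))
    (hs : (seq.map (fun h => h.1)).Pairwise (· ≤ ·)) (p : Int) :
    pvInside (seq.map (fun h => h.1)) (pvBuildPref seq none []) p
      = seq.any (fun h => h.1 < p ∧ p < h.2) := by
  have hlen : (seq.map (fun h => h.1)).length = seq.length := List.length_map _
  have hspec := pvLowerBound_spec (seq.map (fun h => h.1)) p hs
    ((seq.map (fun h => h.1)).length) 0 ((seq.map (fun h => h.1)).length) rfl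
    (Nat.zero_le _) le_rfl (fun j hj hjl => by omega) (fun j hj hjl => by omega)
  set r := pvLowerBound (seq.map (fun h => h.1)) p 0 (seq.map (fun h => h.1)).length with hr
  obtain ⟨-, hrle, hbelow, habove⟩ := hspec
  rw [Bool.eq_iff_iff]
  unfold pvInside
  rw [← hr]
  simp only [Bool.and_eq_true, decide_eq_true_eq, List.any_eq_true]
  constructor
  · rintro ⟨hrpos, hlt⟩
    have hr1 : r - 1 < seq.length := by omega
    have hgd := buildPref_getD seq none (r - 1) hr1
    have htl : ((seq.take (r - 1 + 1)).map (fun h => h.2)).length = r := by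
      simp [List.length_take]; omega
    cases hE : (seq.take (r - 1 + 1)).map (fun h => h.2) with
    | nil => rw [hE] at htl; simp at htl; omega
    | cons y ys =>
      rw [hE] at hgd
      have hfold : mfold none (y :: ys) = some (ys.foldl max y) := by
        have h0 : mfold none (y :: ys) = mfold (some y) ys := rfl
        rw [h0, mfold_some]
      rw [hfold] at hgd
      have hv : (pvBuildPref seq none []).getD (r - 1) 0 = ys.foldl max y := by
        exact Option.some.inj hgd
      rw [hv] at hlt
      have hmem : ys.foldl max y ∈ y :: ys := by
        rcases PySem.List.foldl_max_mem ys y with h | h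
        · rw [h]; exact List.mem_cons_self
        · exact List.mem_cons_of_mem _ h
      rw [← hE] at hmem
      obtain ⟨hh, hhmem, hhv⟩ := List.mem_map.mp hmem
      obtain ⟨i, hi, hieq⟩ := List.getElem_of_mem hhmem
      have hir : i < r := by
        rw [List.length_take] at hi; omega
      have hiseq : i < seq.length := by omega
      have hseqi : (seq.take (r - 1 + 1))[i] = seq[i] := List.getElem_take
      rw [hseqi] at hieq
      refine ⟨seq[i], List.getElem_mem hiseq, ?_, ?_⟩
      · have := hbelow i (by omega) (by omega)
        simpa using this
      · rw [hieq, hhv]; exact hlt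
  · rintro ⟨hh, hhmem, h1, h2⟩
    obtain ⟨i, hi, hieq⟩ := List.getElem_of_mem hhmem
    have hstart : (seq.map (fun h => h.1))[i] = hh.1 := by simp [hieq]
    have hir : i < r := by
      by_contra hc
      push Not at hc
      have := habove i (by omega) hc
      rw [hstart] at this
      omega
    have hrpos : 0 < r := by omega
    refine ⟨hrpos, ?_⟩
    have hr1 : r - 1 < seq.length := by omega
    have hgd := buildPref_getD seq none (r - 1) hr1
    have htake : i < (seq.take (r - 1 + 1)).length := by
      rw [List.length_take]; omega
    have hmem2 : hh.2 ∈ (seq.take (r - 1 + 1)).map (fun h => h.2) := by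
      refine List.mem_map.mpr ⟨seq[i], ?_, by rw [hieq]⟩
      have : (seq.take (r - 1 + 1))[i] = seq[i] := List.getElem_take
      rw [← this]
      exact List.getElem_mem htake
    cases hE : (seq.take (r - 1 + 1)).map (fun h => h.2) with
    | nil => rw [hE] at hmem2; simp at hmem2
    | cons y ys =>
      rw [hE] at hgd hmem2
      have hfold : mfold none (y :: ys) = some (ys.foldl max y) := by
        have h0 : mfold none (y :: ys) = mfold (some y) ys := rfl
        rw [h0, mfold_some]
      rw [hfold] at hgd
      have hv : (pvBuildPref seq none []).getD (r - 1) 0 = ys.foldl max y :=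
        Option.some.inj hgd
      rw [hv]
      have hle2 : hh.2 ≤ ys.foldl max y := by
        rcases List.mem_cons.mp hmem2 with h | h
        · rw [h]; exact (PySem.List.le_foldl_max ys y).1
        · exact (PySem.List.le_foldl_max ys y).2 _ h
      omega

-- ---- assembling B ----

lemma pvOverlaps_char (hints : List (Int × Int)) (x0 x1 : Int) :
    pvOverlaps (pvIndexHints hints).1 (pvIndexHints hints).2
      ((PySem.List.sorted hints (fun h => h.1) false).map (fun h => h.1))
      (pvBuildPref (PySem.List.sorted hints (fun h => h.1) false) none []) x0 x1
      = hints.any (fun h => pvOv x0 x1 h) := by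
  have hperm := PySem.List.sorted_perm hints (fun h => h.1) false
  have hs : ((PySem.List.sorted hints (fun h => h.1) false).map (fun h => h.1)).Pairwise
      (· ≤ ·) := by
    rw [List.pairwise_map]
    exact PySem.List.sorted_pairwise hints (fun h => h.1)
  unfold pvOverlaps
  rw [shareStart_char, shareEnd_char, pvInside_char _ hs x0, pvInside_char _ hs x1,
    hperm.any_eq, hperm.any_eq]
  rw [Bool.eq_iff_iff]
  simp only [Bool.or_eq_true, List.any_eq_true, decide_eq_true_eq, pvOv]
  constructor
  · rintro (((⟨h, hm, h1, h2⟩ | ⟨h, hm, h1, h2⟩) | ⟨h, hm, h1, h2⟩) | ⟨h, hm, h1, h2⟩)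
    · exact ⟨h, hm, by tauto⟩
    · exact ⟨h, hm, by tauto⟩
    · exact ⟨h, hm, by tauto⟩
    · exact ⟨h, hm, by tauto⟩
  · rintro ⟨h, hm, (⟨h1, h2⟩ | ⟨h1, h2⟩ | ⟨h1, h2⟩ | ⟨h1, h2⟩)⟩
    · exact Or.inl (Or.inl (Or.inl ⟨h, hm, by tauto⟩))
    · exact Or.inl (Or.inl (Or.inr ⟨h, hm, by tauto⟩))
    · exact Or.inl (Or.inr ⟨h, hm, h1, h2⟩)
    · exact Or.inr ⟨h, hm, h1, h2⟩

lemma match_char (hints : List (Int × Int)) (x0 x1 : Int) :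
    PySem.Set.contains (PySem.Set.ofList hints) (x0, x1) = hints.any (fun h => pvMt x0 x1 h) := by
  rw [Bool.eq_iff_iff, PySem.Set.contains_iff, PySem.Set.mem_ofList]
  simp only [List.any_eq_true, pvMt, decide_eq_true_eq]
  constructor
  · intro hmem; exact ⟨_, hmem, rfl⟩
  · rintro ⟨h, hm, rfl⟩; exact hm

-- ===== VERDICT (by name: the statement is the Claim_ definition above) =====
theorem checkStem3ArgsOverlap_spec : Claim_equal_checkStem3ArgsOverlap := by
  intro arg_list hint_list _
  unfold Spec_checkStem3ArgsOverlap checkStem3ArgsOverlap checkStem3ArgsOverlap_alt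
  rw [pvOuterA_eq]
  simp only [pvOverlaps_char, match_char, List.any_map, Function.comp_def]
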